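-- pv_equiv track=rewrite | github.com/LucasKonrath/python-pocs | KBeauty/KBeauty.py | calculateBeauty
-- ===== SOURCE A (Python) =====
-- from collections import Counter
-- from math import comb
--
-- def calculateBeauty(word: str, k: int) -> int:
--     counter = Counter(word)
--     if k > len(counter):
--         return 0
--     modulus = 10**9 + 7
--     sorted_counts = sorted(counter.values(), reverse=True)
--     max_freq = sorted_counts[k - 1]
--     count = sorted_counts.count(max_freq)
--     mult = 1
--
--     for freq in sorted_counts:
--         if freq == max_freq:
--             break
--         k -= 1
--         mult = mult * freq % modulus
--
--     return mult * comb(count, k) * pow(max_freq, k, modulus) % modulus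
-- ===== SOURCE B (Python) =====
-- from collections import Counter
-- from math import comb
--
-- def calculateBeauty(word: str, k: int) -> int:
--     counter = Counter(word)
--     if k > len(counter):
--         return 0
--     modulus = 10 ** 9 + 7
--     counts = list(counter.values())
--     # rank-select the k-th largest count m without sorting:
--     # m is the unique count value with (#counts > m) < k <= (#counts >= m)
--     m = next(v for v in counts
--              if sum(c > v for c in counts) < k <= sum(c >= v for c in counts))
--     mult = 1
--     for c in counts:
--         if c > m:
--             mult = mult * c % modulus
--     rem = k - sum(c > m for c in counts)
--     return mult * comb(counts.count(m), rem) * pow(m, rem, modulus) % modulus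
-- ===== Notes on version B (the rewrite author's own statement) =====
-- stated objective: alternative
-- what changed: B replaces A's sort-then-scan (sort counts descending, index the k-th, loop with break) by sort-free rank selection: it finds the k-th largest count m as the unique value v with #(counts>v) < k <= #(counts>=v), multiplies the counts greater than m by a filtered pass over the unsorted values, and computes the remainder arithmetically.
-- outside the precondition, e.g. on calculateBeauty('ab', 0): A returns 1, B raises StopIteration
import Mathlib
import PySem

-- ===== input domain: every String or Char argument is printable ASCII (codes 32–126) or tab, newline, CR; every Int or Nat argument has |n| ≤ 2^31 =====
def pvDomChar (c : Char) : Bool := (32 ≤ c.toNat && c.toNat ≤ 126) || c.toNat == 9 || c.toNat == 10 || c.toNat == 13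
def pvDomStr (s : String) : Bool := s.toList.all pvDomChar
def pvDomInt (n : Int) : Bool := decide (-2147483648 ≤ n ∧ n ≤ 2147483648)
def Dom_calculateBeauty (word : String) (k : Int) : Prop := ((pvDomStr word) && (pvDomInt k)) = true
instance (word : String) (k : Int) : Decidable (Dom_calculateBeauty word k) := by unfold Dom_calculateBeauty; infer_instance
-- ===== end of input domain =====

-- B replaces A's sort-then-scan by sort-free rank selection of the k-th largest count (alternative algorithm, no speed claim).

-- ===== PORT A =====

-- math.comb(n, k): raises ValueError for negative arguments (such calls are excluded by Pre_; 0 on that dead path)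
def pyComb (n k : Int) : Int :=
  if k < 0 ∨ n < 0 then 0 else (Nat.choose n.toNat k.toNat : Int)

-- A's 'for freq in sorted_counts: if freq == max_freq: break; k -= 1; mult = mult * freq % modulus' (modulus = 10**9+7)
def beautyLoop (l : List Int) (maxf : Int) (k mult : Int) : Int × Int :=
  match l with
  | [] => (k, mult)
  | f :: t => if f == maxf then (k, mult) else beautyLoop t maxf (k - 1) (PySem.Int.mod (mult * f) 1000000007)

def calculateBeauty (word : String) (k : Int) : Int :=
  let counter := PySem.Dict.counter word.toList
  if k > (counter.size : Int) then 0
  else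
    let modulus : Int := 1000000007  -- 10**9 + 7
    let sorted_counts := PySem.List.sorted counter.values (fun x => x) true
    match PySem.List.pyGet? sorted_counts (k - 1) with
    | none => 0  -- IndexError (only reachable for the empty word with k ≤ 0; excluded by Pre_)
    | some max_freq =>
      let count : Int := (sorted_counts.count max_freq : Int)
      let p := beautyLoop sorted_counts max_freq k 1
      PySem.Int.mod (p.2 * pyComb count p.1 * PySem.Int.powMod max_freq p.1.toNat modulus) modulus

-- ===== PORT B =====

def calculateBeauty_alt (word : String) (k : Int) : Int :=
  let counter := PySem.Dict.counter word.toList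
  if k > (counter.size : Int) then 0
  else
    let modulus : Int := 1000000007  -- 10**9 + 7
    let counts := counter.values
    match counts.find? (fun v =>
        decide ((counts.countP (fun c => decide (v < c)) : Int) < k ∧
                k ≤ (counts.countP (fun c => decide (v ≤ c)) : Int))) with
    | none => 0  -- next() raises StopIteration: no value has rank k (only for k ≤ 0; excluded by Pre_)
    | some m =>
      let mult := counts.foldl (fun a c => if m < c then PySem.Int.mod (a * c) modulus else a) 1
      let rem := k - (counts.countP (fun c => decide (m < c)) : Int)
      PySem.Int.mod (mult * pyComb (counts.count m : Int) rem * PySem.Int.powMod m rem.toNat modulus) modulus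

-- ===== PRECONDITION & SPEC =====
-- Pre_ excludes k ≤ 0: there A raises (IndexError on the empty word, ValueError from math.comb) except the
-- accidental corner k = 0 with all character frequencies equal, where A returns 1 while B raises StopIteration.
def Pre_calculateBeauty (word : String) (k : Int) : Prop := 1 ≤ k
instance (word : String) (k : Int) : Decidable (Pre_calculateBeauty word k) := by
  unfold Pre_calculateBeauty; infer_instance

def pvWitness_calculateBeauty : String × Int := ("aab", 1)

def Spec_calculateBeauty (word : String) (k : Int) (out : Int) : Prop := out = calculateBeauty_alt word k
instance (word : String) (k : Int) (out : Int) : Decidable (Spec_calculateBeauty word k out) := by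
  unfold Spec_calculateBeauty; infer_instance

-- ===== CLAIM (what is proved, stated in full; the proofs are below) =====
def Claim_equal_calculateBeauty : Prop := ∀ (word : String) (k : Int), Dom_calculateBeauty word k → Pre_calculateBeauty word k → Spec_calculateBeauty word k (calculateBeauty word k)

-- ===== LEMMAS AND PROOFS =====

-- rank of the element at index i of a descending-sorted list
theorem rank_of_sorted_desc (S : List Int) (h : S.Pairwise (fun a b => b ≤ a))
    (m : Int) (i : Nat) (hi : i < S.length) (hm : S[i] = m) :
    S.countP (fun c => decide (m < c)) ≤ i ∧ i < S.countP (fun c => decide (m ≤ c)) := by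
  induction S generalizing i with
  | nil => simp at hi
  | cons a t ih =>
    rw [List.pairwise_cons] at h
    obtain ⟨ha, ht⟩ := h
    cases i with
    | zero =>
      simp only [List.getElem_cons_zero] at hm
      subst hm
      have h0 : t.countP (fun c => decide (a < c)) = 0 := by
        rw [List.countP_eq_zero]
        intro b hb
        simp only [decide_eq_true_eq]
        exact not_lt.mpr (ha b hb)
      constructor
      · simp [h0]
      · simp
    | succ i =>
      simp only [List.getElem_cons_succ] at hm
      have hi' : i < t.length := by simpa using hi
      obtain ⟨h1, h2⟩ := ih ht i hi' hm
      have hle : m ≤ a := hm ▸ ha _ (List.getElem_mem hi')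
      simp only [List.countP_cons, decide_eq_true_eq]
      refine ⟨?_, ?_⟩
      · split_ifs with hc <;> omega
      · rw [if_pos hle]; omega

-- uniqueness of the value of rank k
theorem rank_unique (L : List Int) (k v w : Int)
    (hv : (L.countP (fun c => decide (v < c)) : Int) < k ∧ k ≤ (L.countP (fun c => decide (v ≤ c)) : Int))
    (hw : (L.countP (fun c => decide (w < c)) : Int) < k ∧ k ≤ (L.countP (fun c => decide (w ≤ c)) : Int)) :
    v = w := by
  rcases lt_trichotomy v w with hlt | heq | hgt
  · exfalso
    have := List.countP_mono_left (l := L)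
      (p := fun c => decide (w ≤ c)) (q := fun c => decide (v < c))
      (by intro x _ hx; simp only [decide_eq_true_eq] at *; omega)
    omega
  · exact heq
  · exfalso
    have := List.countP_mono_left (l := L)
      (p := fun c => decide (v ≤ c)) (q := fun c => decide (w < c))
      (by intro x _ hx; simp only [decide_eq_true_eq] at *; omega)
    omega

-- A's break-loop on a descending-sorted list containing m
theorem beautyLoop_eq (l : List Int) (m : Int) (h : l.Pairwise (fun a b => b ≤ a)) (hm : m ∈ l)
    (k mult : Int) :
    beautyLoop l m k mult =
      (k - (l.countP (fun c => decide (m < c)) : Int),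
       List.foldl (fun a c => PySem.Int.mod (a * c) 1000000007) mult (l.filter (fun c => decide (m < c)))) := by
  induction l generalizing k mult with
  | nil => simp at hm
  | cons f t ih =>
    rw [List.pairwise_cons] at h
    obtain ⟨ha, ht⟩ := h
    by_cases hf : f = m
    · subst hf
      have h0 : t.countP (fun c => decide (f < c)) = 0 :=
        List.countP_eq_zero.mpr (fun b hb => by simpa using not_lt.mpr (ha b hb))
      have hfil : t.filter (fun c => decide (f < c)) = [] :=
        List.filter_eq_nil_iff.mpr (fun b hb => by simpa using not_lt.mpr (ha b hb))
      simp [beautyLoop, h0, hfil]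
    · have hmt : m ∈ t := by
        rcases List.mem_cons.mp hm with h' | h'
        · exact absurd h'.symm hf
        · exact h'
      have hlt : m < f := lt_of_le_of_ne (ha m hmt) (fun e => hf e.symm)
      have hbeq : (f == m) = false := by simp [hf]
      rw [beautyLoop, hbeq]
      simp only [Bool.false_eq_true, if_false]
      rw [ih ht hmt]
      have hcp : (decide (m < f)) = true := by simpa using hlt
      rw [List.countP_cons, List.filter_cons, hcp]
      simp only [if_true, List.foldl_cons, Prod.mk.injEq]
      exact ⟨by push_cast; ring, trivial⟩

-- the mod-multiply accumulator is right-commutative, so the fold is permutation-invariant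
theorem modfold_rcomm (a c d : Int) :
    PySem.Int.mod (PySem.Int.mod (a * c) 1000000007 * d) 1000000007 =
    PySem.Int.mod (PySem.Int.mod (a * d) 1000000007 * c) 1000000007 := by
  have hM : (0 : Int) < 1000000007 := by norm_num
  rw [PySem.Int.mod_eq_emod_of_pos hM, PySem.Int.mod_eq_emod_of_pos hM,
      PySem.Int.mod_eq_emod_of_pos hM, PySem.Int.mod_eq_emod_of_pos hM]
  conv_lhs => rw [Int.mul_emod, Int.emod_emod_of_dvd _ dvd_rfl, ← Int.mul_emod]
  conv_rhs => rw [Int.mul_emod, Int.emod_emod_of_dvd _ dvd_rfl, ← Int.mul_emod]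
  ring_nf

theorem modfold_perm (l₁ l₂ : List Int) (h : l₁.Perm l₂) (init : Int) :
    l₁.foldl (fun a c => PySem.Int.mod (a * c) 1000000007) init =
    l₂.foldl (fun a c => PySem.Int.mod (a * c) 1000000007) init :=
  @List.Perm.foldl_eq _ _ _ _ _ ⟨modfold_rcomm⟩ h init

-- ===== VERDICT (by name: the statement is the Claim_ definition above) =====
theorem calculateBeauty_spec : Claim_equal_calculateBeauty := by
  intro word k _ hk
  unfold Pre_calculateBeauty at hk
  unfold Spec_calculateBeauty calculateBeauty calculateBeauty_alt
  by_cases hguard : k > ((PySem.Dict.counter word.toList).size : Int)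
  · simp only [if_pos hguard]
  · simp only [if_neg hguard]
    set L := (PySem.Dict.counter word.toList).values with hL
    set S := PySem.List.sorted L (fun x => x) true with hS
    have hsize : (PySem.Dict.counter word.toList).size = L.length := by
      simp [hL, PySem.Dict.values, PySem.Dict.size]
    have hperm : S.Perm L := PySem.List.sorted_perm L (fun x => x) true
    have hlenS : S.length = L.length := hperm.length_eq
    have h0 : (0 : Int) ≤ k - 1 := by omega
    have h1 : k - 1 < (S.length : Int) := by rw [hlenS]; omega
    have hiN : (k - 1).toNat < S.length := by omega
    have hg : PySem.List.pyGet? S (k - 1) = some (S[(k - 1).toNat]'hiN) :=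
      PySem.List.pyGet?_eq_some_getElem S h0 h1
    rw [hg]
    set m := S[(k - 1).toNat]'hiN with hm
    have hpw : S.Pairwise (fun a b => b ≤ a) := PySem.List.sorted_pairwise_rev L (fun x => x)
    obtain ⟨r1, r2⟩ := rank_of_sorted_desc S hpw m ((k - 1).toNat) hiN hm.symm
    have hcp1 : S.countP (fun c => decide (m < c)) = L.countP (fun c => decide (m < c)) :=
      hperm.countP_eq _
    have hcp2 : S.countP (fun c => decide (m ≤ c)) = L.countP (fun c => decide (m ≤ c)) :=
      hperm.countP_eq _
    have hrk1 : ((L.countP (fun c => decide (m < c)) : Nat) : Int) < k := by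
      rw [← hcp1]; omega
    have hrk2 : k ≤ ((L.countP (fun c => decide (m ≤ c)) : Nat) : Int) := by
      rw [← hcp2]; omega
    have hmS : m ∈ S := hm ▸ List.getElem_mem hiN
    have hmL : m ∈ L := hperm.mem_iff.mp hmS
    have hPm : (fun v =>
        decide ((L.countP (fun c => decide (v < c)) : Int) < k ∧
                k ≤ (L.countP (fun c => decide (v ≤ c)) : Int))) m = true := by
      simp only [decide_eq_true_eq]
      exact ⟨hrk1, hrk2⟩
    have hfs : (L.find? (fun v =>
        decide ((L.countP (fun c => decide (v < c)) : Int) < k ∧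
                k ≤ (L.countP (fun c => decide (v ≤ c)) : Int)))).isSome = true :=
      List.find?_isSome.mpr ⟨m, hmL, hPm⟩
    obtain ⟨w, hw⟩ := Option.isSome_iff_exists.mp hfs
    have hwP := List.find?_some hw
    have hwm : w = m := by
      refine rank_unique L k w m ?_ ⟨hrk1, hrk2⟩
      simpa using hwP
    rw [hw, hwm]
    dsimp only
    rw [beautyLoop_eq S m hpw hmS k 1]
    dsimp only
    rw [PySem.List.foldl_ite_eq_foldl_filter (fun c => m < c)
        (fun a c => PySem.Int.mod (a * c) 1000000007) L 1]
    rw [modfold_perm _ _ (hperm.filter (fun c => decide (m < c))) 1]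
    rw [hperm.count_eq m, hcp1]
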